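-- pv_equiv track=rewrite | github.com/SKCheongBrian/delta-debug | dd2v6.py | condense_formula
-- ===== SOURCE A (Python) =====
-- def condense_formula(formula):
--     elems  = []
--     result = []
--     for and_term in formula:
--         elems.extend(and_term)
--     for e in elems:
--         if not e in result:
--             result.append(e)
--     result.sort()
--     return result
-- ===== SOURCE B (Python) =====
-- def condense_formula(formula):
--     flat = sorted(x for and_term in formula for x in and_term)
--     result = []
--     i = 0
--     n = len(flat)
--     while i < n:
--         x = flat[i]
--         result.append(x)
--         while i < n and flat[i] == x:
--             i += 1
--     return result
-- ===== Notes on version B (the rewrite author's own statement) =====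
-- stated objective: alternative
-- what changed: B sorts the flattened list once and then dedups with a run-skipping two-pointer scan (append a value, then advance past its whole run of equals), instead of A's membership-scan dedup followed by a sort; it trades A's repeated membership tests for a single ordered pass.
import Mathlib
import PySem

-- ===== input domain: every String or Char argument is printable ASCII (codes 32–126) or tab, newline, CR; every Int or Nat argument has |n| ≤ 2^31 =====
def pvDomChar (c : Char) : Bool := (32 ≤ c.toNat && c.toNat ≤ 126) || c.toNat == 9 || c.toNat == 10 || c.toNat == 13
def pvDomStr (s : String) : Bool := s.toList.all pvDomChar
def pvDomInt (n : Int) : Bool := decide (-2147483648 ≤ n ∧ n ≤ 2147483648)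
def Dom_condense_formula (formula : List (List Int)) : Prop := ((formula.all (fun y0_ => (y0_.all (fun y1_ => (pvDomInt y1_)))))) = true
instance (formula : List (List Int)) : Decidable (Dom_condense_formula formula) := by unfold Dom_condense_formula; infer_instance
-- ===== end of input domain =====

-- B sorts the flattened list once, then dedups with a run-skipping scan (take the head,
-- skip its whole run of equal values, recurse), replacing A's membership-scan dedup
-- followed by a sort (objective: alternative algorithm).

-- ===== PORT A =====
def condense_formula (formula : List (List Int)) : List Int :=
  let elems := formula.foldl (fun acc and_term => acc ++ and_term) []
  let result := elems.foldl (fun r e => if e ∈ r then r else r ++ [e]) []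
  PySem.List.sorted result (fun x => x) false

-- ===== PORT B =====
-- B's inner while loop: starting at the current value x, advance past the whole run of
-- values equal to x; the outer while loop becomes recursion on the remaining suffix.
def skipRuns : List Int → List Int
  | [] => []
  | x :: xs => x :: skipRuns (xs.dropWhile (fun y => y == x))
  termination_by l => l.length
  decreasing_by
    exact Nat.lt_succ_of_le (List.length_dropWhile_le _ _)

def condense_formula_alt (formula : List (List Int)) : List Int :=
  let flat := PySem.List.sorted (formula.flatMap (fun and_term => and_term)) (fun x => x) false
  skipRuns flat

-- ===== PRECONDITION & SPEC =====
def Spec_condense_formula (formula : List (List Int)) (out : List Int) : Prop := out = condense_formula_alt formula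
instance (formula : List (List Int)) (out : List Int) : Decidable (Spec_condense_formula formula out) := by unfold Spec_condense_formula; infer_instance

-- ===== CLAIM =====
def Claim_equal_condense_formula : Prop := ∀ (formula : List (List Int)), Dom_condense_formula formula → Spec_condense_formula formula (condense_formula formula)

-- ===== LEMMAS AND PROOFS =====

-- A's dedup loop: membership is that of the input (plus the accumulator)
theorem memDedupFold (l : List Int) (acc : List Int) (x : Int) :
    x ∈ l.foldl (fun r e => if e ∈ r then r else r ++ [e]) acc ↔ x ∈ acc ∨ x ∈ l := by
  induction l generalizing acc with
  | nil => simp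
  | cons e l ih =>
    simp only [List.foldl_cons]
    by_cases h : e ∈ acc
    · simp only [if_pos h, ih, List.mem_cons]
      constructor
      · rintro (ha | hl)
        · exact Or.inl ha
        · exact Or.inr (Or.inr hl)
      · rintro (ha | rfl | hl)
        · exact Or.inl ha
        · exact Or.inl h
        · exact Or.inr hl
    · simp only [if_neg h, ih, List.mem_append, List.mem_cons]
      tauto

-- A's dedup loop keeps the accumulator duplicate-free
theorem nodupDedupFold (l : List Int) (acc : List Int) (hacc : acc.Nodup) :
    (l.foldl (fun r e => if e ∈ r then r else r ++ [e]) acc).Nodup := by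
  induction l generalizing acc with
  | nil => simpa using hacc
  | cons e l ih =>
    simp only [List.foldl_cons]
    by_cases h : e ∈ acc
    · rw [if_pos h]; exact ih acc hacc
    · rw [if_neg h]
      refine ih _ ?_
      rw [List.nodup_append]
      refine ⟨hacc, by simp, ?_⟩
      intro a ha b hb
      rw [List.mem_singleton] at hb; subst hb
      exact fun hae => h (hae ▸ ha)

-- skipRuns preserves membership (dropWhile (== x) only drops copies of x)
theorem memSkipRuns (l : List Int) (y : Int) : y ∈ skipRuns l ↔ y ∈ l := by
  induction l using skipRuns.induct with
  | case1 => simp [skipRuns]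
  | case2 x xs ih =>
    rw [skipRuns]
    simp only [List.mem_cons, ih]
    constructor
    · rintro (rfl | h)
      · exact Or.inl rfl
      · exact Or.inr (List.dropWhile_sublist _ |>.mem h)
    · rintro (rfl | h)
      · exact Or.inl rfl
      · rcases (List.mem_append.1 ((List.takeWhile_append_dropWhile (l := xs) (p := fun y => y == x)) ▸ h)) with ht | hd
        · exact Or.inl (by simpa using List.mem_takeWhile_imp ht)
        · exact Or.inr hd

-- on a nondecreasing list, skipRuns is strictly increasing
theorem pairwiseSkipRuns (l : List Int) (hl : l.Pairwise (· ≤ ·)) :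
    (skipRuns l).Pairwise (· < ·) := by
  induction l using skipRuns.induct with
  | case1 => simp [skipRuns]
  | case2 x xs ih =>
    rw [skipRuns]
    have hd : (xs.dropWhile (fun y => y == x)).Pairwise (· ≤ ·) :=
      List.Pairwise.sublist (List.dropWhile_sublist _) hl.of_cons
    refine List.pairwise_cons.2 ⟨?_, ih hd⟩
    intro y hy
    have hy' : y ∈ xs.dropWhile (fun y => y == x) := (memSkipRuns _ _).1 hy
    -- split the dropped list as h :: t; x ≤ h (h ∈ xs), h ≠ x (head fails the predicate), h ≤ y
    rcases hdrop : xs.dropWhile (fun y => y == x) with _ | ⟨h, t⟩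
    · simp [hdrop] at hy'
    · have hh_mem : h ∈ xs := (List.dropWhile_sublist _).mem (hdrop ▸ List.mem_cons_self)
      have hxh : x ≤ h := List.rel_of_pairwise_cons hl hh_mem
      have hne : (h == x) = false := by
        have := List.head?_dropWhile_not (fun y => y == x) xs
        rw [hdrop] at this; simpa using this
      have hxh' : x < h := lt_of_le_of_ne hxh (fun he => by simp [he.symm] at hne)
      rw [hdrop] at hy' hd
      rcases List.mem_cons.1 hy' with rfl | hyt
      · exact hxh'
      · exact lt_of_lt_of_le hxh' (List.rel_of_pairwise_cons hd hyt)

-- ===== VERDICT =====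
theorem condense_formula_spec : Claim_equal_condense_formula := by
  intro formula _
  unfold Spec_condense_formula condense_formula condense_formula_alt
  have hflat : formula.foldl (fun acc and_term => acc ++ and_term) [] =
      formula.flatMap (fun and_term => and_term) := by
    simpa using PySem.List.foldl_append_eq_flatMap (fun and_term => and_term) formula []
  rw [hflat]
  set F := formula.flatMap (fun and_term => and_term) with hF
  set R := F.foldl (fun r e => if e ∈ r then r else r ++ [e]) [] with hR
  set S := PySem.List.sorted F (fun x => x) false with hS
  have hSpair : S.Pairwise (· ≤ ·) := by
    simpa using PySem.List.sorted_pairwise F (fun x => x)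
  have hYpair : (skipRuns S).Pairwise (· < ·) := pairwiseSkipRuns S hSpair
  have hYmem : ∀ x, x ∈ skipRuns S ↔ x ∈ F := by
    intro x; rw [memSkipRuns, hS, PySem.List.mem_sorted]
  have hRmem : ∀ x, x ∈ R ↔ x ∈ F := by
    intro x; rw [hR, memDedupFold]; simp
  have hRnodup : R.Nodup := nodupDedupFold F [] (by simp)
  have hYnodup : (skipRuns S).Nodup := hYpair.imp (fun hlt => ne_of_lt hlt)
  have hperm : (skipRuns S).Perm R :=
    (List.perm_ext_iff_of_nodup hYnodup hRnodup).2 (fun x => (hYmem x).trans (hRmem x).symm)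
  exact PySem.List.sorted_eq_of_perm_of_pairwise_lt R (skipRuns S) (fun x => x) hperm hYpair
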